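-- pv_equiv track=rewrite | github.com/blazejosinski/advent-of-code | day2.py | simulate_boat_aim
-- ===== SOURCE A (Python) =====
-- def simulate_boat_aim(actions):
--     position = (0, 0)
--     aim = 0
--     for (forward, aim_change) in actions:
--         if aim_change:
--             aim += aim_change
--         else:
--             position = (position[0]+forward, position[1]+forward*aim)
--     return position[0]*position[1]
-- ===== SOURCE B (Python) =====
-- def simulate_boat_aim(actions):
--     # prefix table of aim values: aims[i] = aim in effect at action i
--     aims = []
--     a = 0
--     for (_, aim_change) in actions:
--         aims.append(a)
--         a += aim_change
--     horizontal = sum(forward for (forward, ac) in actions if not ac)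
--     depth = sum(forward * cum for ((forward, ac), cum) in zip(actions, aims) if not ac)
--     return horizontal * depth
-- ===== Notes on version B (the rewrite author's own statement) =====
-- stated objective: alternative
-- what changed: Replaces the single fused stateful loop with a precomputed running-aim prefix table followed by two filtered-sum passes (horizontal and depth) over the actions zipped with the table.
import Mathlib
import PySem

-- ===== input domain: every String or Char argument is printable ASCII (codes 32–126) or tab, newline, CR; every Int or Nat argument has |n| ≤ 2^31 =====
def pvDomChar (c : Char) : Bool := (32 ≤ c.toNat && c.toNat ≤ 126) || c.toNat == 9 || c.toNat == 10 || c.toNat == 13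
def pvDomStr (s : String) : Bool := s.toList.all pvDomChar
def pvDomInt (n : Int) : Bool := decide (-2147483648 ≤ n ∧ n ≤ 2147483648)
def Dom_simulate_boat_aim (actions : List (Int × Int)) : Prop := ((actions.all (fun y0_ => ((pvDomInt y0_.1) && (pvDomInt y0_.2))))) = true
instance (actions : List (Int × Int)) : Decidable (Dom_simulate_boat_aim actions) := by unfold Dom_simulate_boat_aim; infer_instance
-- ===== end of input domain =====

-- B replaces A's fused stateful loop by a running-aim prefix table plus two filtered-sum passes (alternative decomposition, same cost).
-- ===== PORT A =====
def stepA (st : Int × Int × Int) (act : Int × Int) : Int × Int × Int :=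
  let (px, py, aim) := st
  let (forward, aim_change) := act
  if aim_change ≠ 0 then (px, py, aim + aim_change)
  else (px + forward, py + forward * aim, aim)

def simulate_boat_aim (actions : List (Int × Int)) : Int :=
  let s := actions.foldl stepA (0, 0, 0)
  s.1 * s.2.1

-- ===== PORT B =====
def simulate_boat_aim_alt (actions : List (Int × Int)) : Int :=
  let st := actions.foldl (fun (st : Int × List Int) (act : Int × Int) =>
    (st.1 + act.2, st.2 ++ [st.1])) (0, ([] : List Int))  -- (aim, aims-so-far)
  let aims := st.2
  let horizontal := ((actions.filter (fun p => p.2 == 0)).map (fun p => p.1)).sum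
  let depth := (((actions.zip aims).filter (fun q => q.1.2 == 0)).map (fun q => q.1.1 * q.2)).sum
  horizontal * depth

-- ===== PRECONDITION & SPEC =====
def Spec_simulate_boat_aim (actions : List (Int × Int)) (out : Int) : Prop := out = simulate_boat_aim_alt actions
instance (actions : List (Int × Int)) (out : Int) : Decidable (Spec_simulate_boat_aim actions out) := by unfold Spec_simulate_boat_aim; infer_instance

-- ===== CLAIM (what is proved, stated in full; the proofs are below) =====
def Claim_equal_simulate_boat_aim : Prop := ∀ (actions : List (Int × Int)), Dom_simulate_boat_aim actions → Spec_simulate_boat_aim actions (simulate_boat_aim actions)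

-- ===== LEMMAS AND PROOFS =====

-- spec functions used only by the proofs
def pvH : List (Int × Int) → Int
  | [] => 0
  | (f, ac) :: t => (if ac = 0 then f else 0) + pvH t

def pvD : Int → List (Int × Int) → Int
  | _, [] => 0
  | a, (f, ac) :: t => if ac = 0 then f * a + pvD a t else pvD (a + ac) t

def pvAims : Int → List (Int × Int) → List Int
  | _, [] => []
  | a, (_, ac) :: t => a :: pvAims (a + ac) t

lemma stepA_eq (px py a f ac : Int) :
    stepA (px, py, a) (f, ac) = if ac = 0 then (px + f, py + f * a, a) else (px, py, a + ac) := by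
  by_cases hac : ac = 0 <;> simp [stepA, hac]

lemma foldA_eq (l : List (Int × Int)) (px py a : Int) :
    l.foldl stepA (px, py, a) = (px + pvH l, py + pvD a l, a + (l.map Prod.snd).sum) := by
  induction l generalizing px py a with
  | nil => simp [pvH, pvD]
  | cons h t ih =>
    obtain ⟨f, ac⟩ := h
    rw [List.foldl_cons, stepA_eq]
    by_cases hac : ac = 0 <;>
      simp only [hac, if_pos, if_neg, not_false_iff, ih, pvH, pvD, List.map_cons, List.sum_cons] <;>
      refine Prod.ext (by ring) (Prod.ext (by ring) (by ring))

lemma foldB_eq (l : List (Int × Int)) (a : Int) (acc : List Int) :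
    l.foldl (fun (st : Int × List Int) (act : Int × Int) =>
      (st.1 + act.2, st.2 ++ [st.1])) (a, acc)
    = (a + (l.map Prod.snd).sum, acc ++ pvAims a l) := by
  induction l generalizing a acc with
  | nil => simp [pvAims]
  | cons h t ih =>
    simp [List.foldl, ih, pvAims]
    ring

lemma horizontal_eq (l : List (Int × Int)) :
    ((l.filter (fun p => p.2 == 0)).map (fun p => p.1)).sum = pvH l := by
  induction l with
  | nil => rfl
  | cons h t ih =>
    obtain ⟨f, ac⟩ := h
    by_cases hac : ac = 0 <;> simp [hac, ih, pvH]

lemma depth_eq (l : List (Int × Int)) (a : Int) :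
    (((l.zip (pvAims a l)).filter (fun q => q.1.2 == 0)).map (fun q => q.1.1 * q.2)).sum
      = pvD a l := by
  induction l generalizing a with
  | nil => rfl
  | cons h t ih =>
    obtain ⟨f, ac⟩ := h
    by_cases hac : ac = 0 <;>
      simp only [pvAims, List.zip_cons_cons, List.filter_cons] <;> simp [hac, ih, pvD]

-- ===== VERDICT =====
theorem simulate_boat_aim_spec : Claim_equal_simulate_boat_aim := by
  intro actions _
  unfold Spec_simulate_boat_aim simulate_boat_aim simulate_boat_aim_alt
  simp only [foldA_eq, foldB_eq, List.nil_append, horizontal_eq, depth_eq]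
  simp
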